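-- pv_equiv track=rewrite | github.com/iamlilAJ/literature-conflict-graph | src/aigraph/corpus.py | _strip_tex_comments
-- ===== SOURCE A (Python) =====
-- def _strip_tex_comments(text: str) -> str:
--     lines = []
--     for line in text.splitlines():
--         escaped = False
--         chars: list[str] = []
--         for char in line:
--             if char == "%" and not escaped:
--                 break
--             chars.append(char)
--             escaped = char == "\\"
--         lines.append("".join(chars))
--     return "\n".join(lines)
-- ===== SOURCE B (Python) =====
-- def _strip_tex_comments(text: str) -> str:
--     lines = []
--     for line in text.splitlines():
--         p = 0
--         while True:
--             p = line.find("%", p)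
--             if p == -1:
--                 lines.append(line)
--                 break
--             if p == 0 or line[p - 1] != "\\":
--                 lines.append(line[:p])
--                 break
--             p += 1
--     return "\n".join(lines)
-- ===== Notes on version B (the rewrite author's own statement) =====
-- stated objective: faster
-- what changed: Replaced A's per-character loop carrying an escape flag with a find-based scan per line: repeatedly find the next percent sign, skip occurrences whose preceding character is a backslash, and cut the line with a slice at the first unescaped one.
import Mathlib
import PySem

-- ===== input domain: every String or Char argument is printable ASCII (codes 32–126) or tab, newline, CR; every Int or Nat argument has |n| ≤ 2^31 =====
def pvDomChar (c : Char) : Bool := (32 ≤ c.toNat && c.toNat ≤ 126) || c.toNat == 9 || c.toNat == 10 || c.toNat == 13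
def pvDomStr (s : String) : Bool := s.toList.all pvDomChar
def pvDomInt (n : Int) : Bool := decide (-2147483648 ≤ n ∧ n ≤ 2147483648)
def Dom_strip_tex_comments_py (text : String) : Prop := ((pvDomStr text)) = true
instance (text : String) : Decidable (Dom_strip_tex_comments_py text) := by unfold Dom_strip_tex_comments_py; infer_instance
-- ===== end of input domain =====

-- B replaces A's per-character escape-state loop by a find-based scan per line (simpler decomposition, same semantics).

-- ===== PORT A =====
-- inner loop of A: walk the chars carrying the 'escaped' flag, break at an unescaped '%'
def stripALine : List Char → Bool → List Char
  | [], _ => []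
  | c :: cs, escaped =>
    if c = '%' ∧ escaped = false then []
    else c :: stripALine cs (decide (c = '\\'))

def strip_tex_comments_py (text : String) : String :=
  PySem.Str.join "\n"
    ((PySem.Str.splitlines text).map (fun line => String.ofList (stripALine line.toList false)))

-- ===== PORT B =====
-- inner while-loop of B: repeated line.find('%', p); the fuel is a totality guard only
-- (p grows by at least 1 per iteration and stays ≤ length, so length+1 fuel is never exhausted)
def goB (l : List Char) : Int → Nat → List Char
  | _, 0 => l
  | p, fuel + 1 =>
    let q := PySem.Chars.findFrom l ['%'] p none
    if q = -1 then l
    else if q = 0 ∨ PySem.List.pyGet? l (q - 1) ≠ some '\\' then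
      PySem.List.slice l none (some q)
    else goB l (q + 1) fuel

def strip_tex_comments_py_alt (text : String) : String :=
  PySem.Str.join "\n"
    ((PySem.Str.splitlines text).map
      (fun line => String.ofList (goB line.toList 0 (line.toList.length + 1))))

-- ===== PRECONDITION & SPEC =====
def Spec_strip_tex_comments_py (text : String) (out : String) : Prop := out = strip_tex_comments_py_alt text
instance (text : String) (out : String) : Decidable (Spec_strip_tex_comments_py text out) := by unfold Spec_strip_tex_comments_py; infer_instance

-- ===== CLAIM (what is proved, stated in full; the proofs are below) =====
def Claim_equal_strip_tex_comments_py : Prop := ∀ (text : String), Dom_strip_tex_comments_py text → Spec_strip_tex_comments_py text (strip_tex_comments_py text)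

-- ===== LEMMAS AND PROOFS =====

lemma prefix_pct_drop (l : List Char) (i : Nat) : ['%'] <+: l.drop i ↔ l[i]? = some '%' := by
  constructor
  · rintro ⟨t, ht⟩
    have h : (l.drop i).head? = some '%' := by rw [← ht]; rfl
    simpa [List.head?_drop] using h
  · intro h
    have h' : (l.drop i).head? = some '%' := by simpa [List.head?_drop] using h
    rcases hd : l.drop i with _ | ⟨c, cs⟩
    · rw [hd] at h'; simp at h'
    · rw [hd] at h'; simp at h'
      exact ⟨cs, by simp [h']⟩

-- characterisation of A's inner loop as a take up to the first unescaped '%'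
lemma stripA_take (l : List Char) (esc : Bool) (r : Nat) (hr : r ≤ l.length)
    (h1 : ∀ i < r, l[i]? = some '%' → (if i = 0 then esc = true else l[i-1]? = some '\\'))
    (h2 : r < l.length → l[r]? = some '%' ∧ (if r = 0 then esc = false else l[r-1]? ≠ some '\\')) :
    stripALine l esc = l.take r := by
  induction l generalizing esc r with
  | nil => simp [stripALine]
  | cons c cs ih =>
    cases r with
    | zero =>
      obtain ⟨hc, hesc⟩ := h2 (by simp)
      simp at hc hesc
      simp [stripALine, hc, hesc]
    | succ r' =>
      have hc0 : ¬ (c = '%' ∧ esc = false) := by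
        rintro ⟨hc, he⟩
        have := h1 0 (by omega) (by simp [hc])
        simp [he] at this
      rw [stripALine, if_neg hc0, List.take_succ_cons]
      congr 1
      apply ih (decide (c = '\\')) r' (by simpa using hr)
      · intro i hi hpi
        have h := h1 (i+1) (by omega) (by simpa using hpi)
        cases i with
        | zero => simp at h ⊢; simp [h]
        | succ j => simpa using h
      · intro hlt
        obtain ⟨ha, hb⟩ := h2 (by simpa using Nat.succ_lt_succ hlt)
        refine ⟨by simpa using ha, ?_⟩
        cases r' with
        | zero =>
          simp at hb ⊢
          intro hcb; subst hcb; simp at hb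
        | succ j => simpa using hb

-- B's while-loop computes A's inner loop, given every '%' before p escaped
lemma goB_spec (l : List Char) : ∀ (fuel p : Nat), p ≤ l.length → l.length + 1 - p ≤ fuel →
    (∀ i < p, l[i]? = some '%' → 1 ≤ i ∧ l[i-1]? = some '\\') →
    goB l (p : Int) fuel = stripALine l false := by
  intro fuel
  induction fuel with
  | zero => intro p hp hf _; omega
  | succ fuel ih =>
    intro p hp hf hinv
    rw [goB]
    set q := PySem.Chars.findFrom l ['%'] (p : Int) none with hq
    by_cases hqn : q = -1
    · -- no '%' at any index ≥ p : B keeps the whole line and A does too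
      rw [if_pos hqn]
      have hno : ¬ ['%'] <:+: l.drop p := by
        rw [← PySem.Chars.findFrom_natCast_eq_neg_one_iff l ['%'] p hp]; exact hqn
      rw [stripA_take l false l.length le_rfl ?_ (by intro h; exact absurd h (lt_irrefl _))]
      · simp
      · intro i hi hpi
        by_cases hip : i < p
        · obtain ⟨h1, h2⟩ := hinv i hip hpi
          have : ¬ i = 0 := by omega
          simp [this, h2]
        · exfalso
          apply hno
          have hpre : ['%'] <+: (l.drop p).drop (i - p) := by
            rw [List.drop_drop, show p + (i - p) = i by omega]
            exact (prefix_pct_drop l i).2 hpi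
          exact hpre.isInfix.trans (List.drop_suffix _ _).isInfix
    · rw [if_neg hqn]
      obtain ⟨hpq, hpre, hmin⟩ := PySem.Chars.findFrom_natCast_spec l ['%'] p hp hqn
      rw [← hq] at hpq hpre hmin
      have hqmem : l[q.toNat]? = some '%' := (prefix_pct_drop l q.toNat).1 hpre
      have hq0 : 0 ≤ q := le_trans (by exact_mod_cast Nat.zero_le p) hpq
      have hqlt : q.toNat < l.length := by
        by_contra h
        rw [List.getElem?_eq_none (by omega)] at hqmem; simp at hqmem
      have hnomid : ∀ i, p ≤ i → i < q.toNat → l[i]? ≠ some '%' := by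
        intro i h1 h2 hpi
        exact hmin i h1 h2 ((prefix_pct_drop l i).2 hpi)
      by_cases hbr : q = 0 ∨ PySem.List.pyGet? l (q - 1) ≠ some '\\'
      · rw [if_pos hbr, PySem.List.slice_to l hq0]
        rw [stripA_take l false q.toNat (by omega) ?_ ?_]
        · intro i hi hpi
          by_cases hip : i < p
          · obtain ⟨ha, hb⟩ := hinv i hip hpi
            have : ¬ i = 0 := by omega
            simp [this, hb]
          · exact absurd hpi (hnomid i (by omega) hi)
        · intro _
          refine ⟨hqmem, ?_⟩
          by_cases hz : q.toNat = 0
          · simp [hz]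
          · simp only [if_neg hz]
            rcases hbr with h | h
            · exfalso; apply hz; rw [h]; rfl
            · intro hcontra
              apply h
              have : q - 1 = ((q.toNat - 1 : Nat) : Int) := by omega
              rw [this, PySem.List.pyGet?_natCast]
              rwa [List.getElem?_eq_getElem (by omega)] at hcontra ⊢
      · rw [if_neg hbr]
        rw [not_or, not_not] at hbr
        obtain ⟨hqz, hback⟩ := hbr
        have hq1 : 1 ≤ q.toNat := by omega
        have hbacki : l[q.toNat - 1]? = some '\\' := by
          have : q - 1 = ((q.toNat - 1 : Nat) : Int) := by omega
          rw [this, PySem.List.pyGet?_natCast] at hback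
          exact hback
        have hcast : q + 1 = ((q.toNat + 1 : Nat) : Int) := by omega
        rw [hcast]
        apply ih (q.toNat + 1) (by omega) (by omega)
        intro i hi hpi
        by_cases hip : i < p
        · exact hinv i hip hpi
        · by_cases hiq : i < q.toNat
          · exact absurd hpi (hnomid i (by omega) hiq)
          · have : i = q.toNat := by omega
            subst this
            exact ⟨hq1, hbacki⟩

lemma perLine (l : List Char) : goB l 0 (l.length + 1) = stripALine l false := by
  have := goB_spec l (l.length + 1) 0 (by omega) (by omega) (by intro i hi; omega)
  simpa using this

-- ===== VERDICT (by name: the statement is the Claim_ definition above) =====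
theorem strip_tex_comments_py_spec : Claim_equal_strip_tex_comments_py := by
  intro text _
  unfold Spec_strip_tex_comments_py strip_tex_comments_py strip_tex_comments_py_alt
  congr 1
  apply List.map_congr_left
  intro line _
  rw [perLine]
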